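-- pv_equiv track=rewrite | github.com/dj-lumiere/problem-solving-boj | 백준/Silver/27884. 가희와 서울 지하철 3호선/가희와 서울 지하철 3호선.py | roller_coaster_length
-- ===== SOURCE A (Python) =====
-- def roller_coaster_length(level: list[int]) -> int:
--     answer_dp = [0 for i in range(len(level))]
--     for (i, j) in enumerate(level):
--         if i == 0:
--             answer_dp[i] = 1
--         else:
--             if j != level[i - 1]:
--                 answer_dp[i] = answer_dp[i - 1] + 1
--             else:
--                 answer_dp[i] = 1
--     return max(answer_dp)
-- ===== SOURCE B (Python) =====
-- def roller_coaster_length(level: list[int]) -> int: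
--     n = len(level)
--     starts = [i for i in range(n) if i == 0 or level[i] == level[i - 1]]
--     return max(e - s for s, e in zip(starts, starts[1:] + [n]))
-- ===== Notes on version B (the rewrite author's own statement) =====
-- stated objective: alternative
-- what changed: B computes the run-start indices (i==0 or level[i]==level[i-1]) and takes the max gap between consecutive starts, instead of A's per-index DP array of run lengths ending at each position.
-- outside the precondition, e.g. on roller_coaster_length([]): A raises ValueError, B raises ValueError
import Mathlib
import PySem

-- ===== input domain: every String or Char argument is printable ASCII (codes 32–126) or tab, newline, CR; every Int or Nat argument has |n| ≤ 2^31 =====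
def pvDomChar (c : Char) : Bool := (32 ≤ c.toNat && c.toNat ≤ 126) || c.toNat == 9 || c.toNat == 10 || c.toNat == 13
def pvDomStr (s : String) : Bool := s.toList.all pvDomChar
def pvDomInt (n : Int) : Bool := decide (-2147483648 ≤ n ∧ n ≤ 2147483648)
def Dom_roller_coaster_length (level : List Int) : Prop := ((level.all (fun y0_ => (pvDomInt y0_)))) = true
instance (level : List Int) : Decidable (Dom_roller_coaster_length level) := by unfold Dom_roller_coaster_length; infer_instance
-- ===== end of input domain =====

-- B recomputes the answer from run-start indices (filter + gaps between consecutive starts) instead of A's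
-- per-index DP array; objective: alternative decomposition, same O(n) cost.

-- ===== PORT A =====
-- loop body of A's 'for (i, j) in enumerate(level)' (kept as a named helper)
def stepA (level : List Int) (dp : List Int) (ij : Int × Int) : List Int :=
  if ij.1 == 0 then PySem.List.pySetD dp ij.1 1
  else if ij.2 != PySem.List.pyGetD level (ij.1 - 1) 0 then
    PySem.List.pySetD dp ij.1 (PySem.List.pyGetD dp (ij.1 - 1) 0 + 1)
  else PySem.List.pySetD dp ij.1 1

def roller_coaster_length (level : List Int) : Int :=
  let answer_dp : List Int := (PySem.List.pyRange 0 (level.length : Int) 1).map (fun _ => (0 : Int))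
  let answer_dp := (PySem.List.enumerate level).foldl (stepA level) answer_dp
  (PySem.List.max? answer_dp (fun x => x)).getD 0

-- ===== PORT B =====
def roller_coaster_length_alt (level : List Int) : Int :=
  let n : Int := level.length
  let starts := (PySem.List.pyRange 0 n 1).filter (fun i =>
    i == 0 || (PySem.List.pyGet? level i == PySem.List.pyGet? level (i - 1)))
  let gaps := (starts.zip (starts.drop 1 ++ [n])).map (fun se => se.2 - se.1)
  (PySem.List.max? gaps (fun x => x)).getD 0

-- ===== PRECONDITION & SPEC =====
-- Python A raises ValueError (max of an empty list) on [], and B raises the same way; [] is excluded.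
def Pre_roller_coaster_length (level : List Int) : Prop := level ≠ []
instance (level : List Int) : Decidable (Pre_roller_coaster_length level) := by
  unfold Pre_roller_coaster_length; infer_instance

def pvWitness_roller_coaster_length : List Int := [3, 1, 1, 2]

def Spec_roller_coaster_length (level : List Int) (out : Int) : Prop := out = roller_coaster_length_alt level
instance (level : List Int) (out : Int) : Decidable (Spec_roller_coaster_length level out) := by
  unfold Spec_roller_coaster_length; infer_instance

-- ===== CLAIM (what is proved, stated in full; the proofs are below) =====
def Claim_equal_roller_coaster_length : Prop := ∀ (level : List Int), Dom_roller_coaster_length level → Pre_roller_coaster_length level → Spec_roller_coaster_length level (roller_coaster_length level)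

-- ===== LEMMAS AND PROOFS =====

-- reference value: dpF level i = A's answer_dp[i]
def dpF (level : List Int) : Nat → Int
  | 0 => 1
  | (i+1) => if level.getD (i+1) 0 ≠ level.getD i 0 then dpF level i + 1 else 1

-- Nat-side version of B's run-start predicate
def startB (level : List Int) (k : Nat) : Bool :=
  k == 0 || (level.getD k 0 == level.getD (k - 1) 0)

-- max of a list of nonnegative ints, with 0 for []
def MX (xs : List Int) : Int := xs.foldl max 0

-- gaps between consecutive starts, closed by n
def gapsN (n : Nat) : List Nat → List Int
  | [] => []
  | [s] => [(n : Int) - (s : Int)]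
  | s :: s' :: r => ((s' : Int) - (s : Int)) :: gapsN n (s' :: r)

lemma foldl_max_init (l : List Int) : ∀ c : Int, 0 ≤ c → l.foldl max c = max c (l.foldl max 0) := by
  induction l with
  | nil => intro c hc; simpa using by omega
  | cons x l ih =>
    intro c hc
    simp only [List.foldl_cons]
    rw [ih (max c x) (le_trans hc (le_max_left _ _)), ih (max 0 x) (le_max_left _ _)]
    omega

lemma MX_nonneg (l : List Int) : 0 ≤ MX l := (PySem.List.le_foldl_max l 0).1

lemma MX_cons (x : Int) (t : List Int) (h : 0 ≤ x) : MX (x :: t) = max x (MX t) := by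
  unfold MX
  simp only [List.foldl_cons]
  rw [foldl_max_init t (max 0 x) (le_max_left _ _)]
  omega

lemma MX_append (l₁ l₂ : List Int) : MX (l₁ ++ l₂) = max (MX l₁) (MX l₂) := by
  unfold MX
  rw [List.foldl_append, foldl_max_init l₂ (List.foldl max 0 l₁) (MX_nonneg l₁)]

lemma max?_getD_eq_MX (xs : List Int) (h : xs ≠ []) (h0 : ∀ x ∈ xs, 0 ≤ x) :
    (PySem.List.max? xs (fun y => y)).getD 0 = MX xs := by
  cases xs with
  | nil => simp at h
  | cons x t =>
    rw [PySem.List.max?_id_cons, Option.getD_some, MX_cons x t (h0 x (List.mem_cons_self))]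
    rw [foldl_max_init t x (h0 x (List.mem_cons_self))]
    rfl

lemma dpF_of_start (level : List Int) (s : Nat) (hs : startB level s = true) : dpF level s = 1 := by
  cases s with
  | zero => rfl
  | succ j =>
    have heq : level.getD (j + 1) 0 = level.getD j 0 := by
      simp only [startB, beq_iff_eq, Bool.or_eq_true, Nat.add_sub_cancel] at hs
      rcases hs with h | h
      · omega
      · exact h
    simp only [dpF]
    rw [if_neg (not_ne_iff.mpr heq)]

lemma dpF_run (level : List Int) (s : Nat) (hs : startB level s = true) :
    ∀ m : Nat, (∀ t, 0 < t → t ≤ m → startB level (s + t) = false) → dpF level (s + m) = (m : Int) + 1 := by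
  intro m
  induction m with
  | zero => intro _; simpa using dpF_of_start level s hs
  | succ m ih =>
    intro hnost
    have hm := ih (fun t ht1 ht2 => hnost t ht1 (le_trans ht2 (Nat.le_succ m)))
    have hf : startB level (s + m + 1) = false := by
      have := hnost (m + 1) (Nat.succ_pos m) (le_refl _)
      simpa [Nat.add_assoc] using this
    simp only [startB, Bool.or_eq_false_iff, beq_eq_false_iff_ne, ne_eq,
      Nat.add_sub_cancel] at hf
    show dpF level (s + m + 1) = _
    simp only [dpF]
    rw [if_pos hf.2, hm]
    push_cast; ring

lemma MX_run (f : Nat → Int) (s : Nat) :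
    ∀ k : Nat, (∀ i, s ≤ i → i < s + k → f i = (i : Int) - (s : Int) + 1) →
    MX ((List.range' s k).map f) = (k : Int) := by
  intro k
  induction k with
  | zero => intro _; simp [MX]
  | succ k ih =>
    intro h
    have hsplit : List.range' s (k + 1) = List.range' s k ++ [s + k] := by
      simpa using (List.range'_concat (s := s) (n := k) (step := 1))
    rw [hsplit, List.map_append, MX_append, ih (fun i h1 h2 => h i h1 (by omega))]
    have : f (s + k) = (k : Int) + 1 := by rw [h (s + k) (by omega) (by omega)]; push_cast; ring
    simp [MX, this]
    omega

lemma gapsN_nonneg (n : Nat) : ∀ S : List Nat, List.Pairwise (· < ·) S → (∀ s ∈ S, s < n) →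
    ∀ x ∈ gapsN n S, 0 ≤ x := by
  intro S
  induction S with
  | nil => intro _ _ x hx; simp [gapsN] at hx
  | cons s r ih =>
    intro hch hlt x hx
    rw [List.pairwise_cons] at hch
    cases r with
    | nil =>
      simp only [gapsN, List.mem_singleton] at hx
      have := hlt s (List.mem_cons_self)
      omega
    | cons s' r' =>
      simp only [gapsN, List.mem_cons] at hx
      rcases hx with h | h
      · have : s < s' := hch.1 s' (List.mem_cons_self)
        omega
      · exact ih hch.2 (fun t ht => hlt t (List.mem_cons_of_mem _ ht)) x h

-- ===== A-side characterization =====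

lemma dpF_succ (level : List Int) (k : Nat) (hk : 0 < k) :
    dpF level k = if level.getD k 0 ≠ level.getD (k - 1) 0 then dpF level (k - 1) + 1 else 1 := by
  obtain ⟨j, rfl⟩ : ∃ j, k = j + 1 := ⟨k - 1, by omega⟩
  simp [dpF]

lemma dpF_pos (level : List Int) : ∀ i, 1 ≤ dpF level i := by
  intro i
  induction i with
  | zero => simp [dpF]
  | succ j ih =>
    simp only [dpF]
    split
    · omega
    · omega

lemma foldA (level : List Int) : ∀ (tail : List Int) (k : Nat), 0 < k → k ≤ level.length →
    level.drop k = tail →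
    (PySem.List.enumerate tail (k : Int)).foldl (stepA level)
      ((List.range k).map (dpF level) ++ List.replicate (level.length - k) 0)
    = (List.range level.length).map (dpF level) := by
  intro tail
  induction tail with
  | nil =>
    intro k hk0 hkle hdrop
    have hk : k = level.length := by
      have := List.drop_eq_nil_iff.mp hdrop
      omega
    subst hk
    simp [PySem.List.enumerate]
  | cons x tail' ih =>
    intro k hk0 hkle hdrop
    have hklt : k < level.length := by
      by_contra hcon
      have h2 : level.drop k = [] := List.drop_eq_nil_iff.mpr (by omega)
      rw [h2] at hdrop
      exact List.cons_ne_nil x tail' hdrop.symm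
    have hcd := List.getElem_cons_drop (as := level) (i := k) hklt
    rw [hdrop] at hcd
    have hxval : x = level.getD k 0 := by
      rw [List.getD_eq_getElem level 0 hklt]
      exact (List.cons_eq_cons.mp hcd).1.symm
    have htail' : level.drop (k + 1) = tail' := (List.cons_eq_cons.mp hcd).2
    have hc : (k : Int) - 1 = ((k - 1 : Nat) : Int) := by omega
    have hdp : ((List.range k).map (dpF level) ++ List.replicate (level.length - k) 0).getD (k - 1) 0
        = dpF level (k - 1) := by
      rw [List.getD_append _ _ _ _ (by simp; omega)]
      rw [List.getD_eq_getElem?_getD]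
      simp [(by omega : k - 1 < k)]
    have hset : ((List.range k).map (dpF level) ++ List.replicate (level.length - k) 0).set k (dpF level k)
        = (List.range (k + 1)).map (dpF level) ++ List.replicate (level.length - (k + 1)) 0 := by
      have hrep : List.replicate (level.length - k) (0 : Int)
          = 0 :: List.replicate (level.length - (k + 1)) 0 := by
        rw [show level.length - k = (level.length - (k + 1)) + 1 by omega, List.replicate_succ]
      rw [List.set_append_right _ _ (by simp)]
      rw [hrep]
      simp [List.range_succ]
    have hstep : stepA level ((List.range k).map (dpF level) ++ List.replicate (level.length - k) 0) ((k : Int), x)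
        = (List.range (k + 1)).map (dpF level) ++ List.replicate (level.length - (k + 1)) 0 := by
      unfold stepA
      have hk0' : (((k : Int)) == (0 : Int)) = false := by
        simp only [beq_eq_false_iff_ne, ne_eq, Int.natCast_eq_zero]
        omega
      simp only [hk0', Bool.false_eq_true, if_false, hc, PySem.List.pyGetD_natCast]
      by_cases hbr : level.getD k 0 = level.getD (k - 1) 0
      · have hb : (x != level.getD (k - 1) 0) = false := by rw [hxval]; exact bne_eq_false_iff_eq.mpr hbr
        rw [hb]
        simp only [Bool.false_eq_true, if_false, PySem.List.pySetD_natCast]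
        rw [← hset, dpF_succ level k hk0, if_neg (not_ne_iff.mpr hbr)]
      · have hb : (x != level.getD (k - 1) 0) = true := by rw [hxval]; exact bne_iff_ne.mpr hbr
        rw [hb]
        simp only [if_true, PySem.List.pySetD_natCast, hdp]
        rw [← hset, dpF_succ level k hk0, if_pos hbr]
    rw [PySem.List.enumerate_cons, List.foldl_cons, hstep,
      show ((k : Int) + 1) = ((k + 1 : Nat) : Int) by push_cast; ring]
    exact ih (k + 1) (by omega) (by omega) htail'

lemma A_eq (level : List Int) (h : level ≠ []) :
    roller_coaster_length level = MX ((List.range level.length).map (dpF level)) := by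
  obtain ⟨x, rest, rfl⟩ := List.exists_cons_of_ne_nil h
  rw [show roller_coaster_length (x :: rest)
      = (PySem.List.max? ((PySem.List.enumerate (x :: rest) 0).foldl (stepA (x :: rest))
          ((PySem.List.pyRange 0 (((x :: rest).length : Nat) : Int) 1).map (fun _ => (0 : Int))))
        (fun y => y)).getD 0 from rfl]
  have hinit : (PySem.List.pyRange 0 (((x :: rest).length : Nat) : Int) 1).map (fun _ => (0 : Int))
      = List.replicate (x :: rest).length 0 := by
    rw [PySem.List.pyRange_one]
    simp [List.map_map, Function.comp_def]
  have hfirst : stepA (x :: rest) (List.replicate (x :: rest).length 0) (0, x)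
      = (List.range 1).map (dpF (x :: rest)) ++ List.replicate ((x :: rest).length - 1) 0 := by
    unfold stepA
    simp only [BEq.rfl, if_true]
    rw [show ((0 : Int)) = ((0 : Nat) : Int) from rfl, PySem.List.pySetD_natCast]
    simp [List.replicate_succ, dpF]
  rw [hinit, PySem.List.enumerate_cons, List.foldl_cons, hfirst,
    show ((0 : Int) + 1) = ((1 : Nat) : Int) by norm_num,
    foldA (x :: rest) rest 1 one_pos (by simp) (by simp)]
  rw [max?_getD_eq_MX _ (by simp) ?_]
  intro y hy
  obtain ⟨i, _, rfl⟩ := List.mem_map.mp hy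
  exact le_trans (by omega) (dpF_pos (x :: rest) i)

-- ===== B-side characterization =====

lemma zip_gapsN (n : Nat) : ∀ S : List Nat,
    ((List.map (fun k : Nat => (k : Int)) S).zip
        ((List.map (fun k : Nat => (k : Int)) S).drop 1 ++ [(n : Int)])).map
      (fun se => se.2 - se.1) = gapsN n S := by
  intro S
  induction S with
  | nil => simp [gapsN]
  | cons s r ih =>
    cases r with
    | nil => simp [gapsN]
    | cons s' r' =>
      have ih' := ih
      simp only [List.map_cons, List.drop_succ_cons, List.drop_zero] at ih'
      simp only [List.map_cons, List.drop_succ_cons, List.drop_zero, List.cons_append,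
        List.zip_cons_cons]
      rw [show gapsN n (s :: s' :: r') = ((s' : Int) - (s : Int)) :: gapsN n (s' :: r') from rfl]
      exact congrArg _ ih'

lemma gapsN_ne_nil (n : Nat) (S : List Nat) (h : S ≠ []) : gapsN n S ≠ [] := by
  cases S with
  | nil => exact absurd rfl h
  | cons s r => cases r <;> simp [gapsN]

lemma B_eq (level : List Int) (h : level ≠ []) :
    roller_coaster_length_alt level
      = MX (gapsN level.length ((List.range level.length).filter (startB level))) := by
  have hn : 0 < level.length := List.length_pos_iff.mpr h
  rw [show roller_coaster_length_alt level
      = (PySem.List.max? ((((PySem.List.pyRange 0 (level.length : Int) 1).filter (fun i =>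
            i == 0 || (PySem.List.pyGet? level i == PySem.List.pyGet? level (i - 1)))).zip
          (((PySem.List.pyRange 0 (level.length : Int) 1).filter (fun i =>
            i == 0 || (PySem.List.pyGet? level i == PySem.List.pyGet? level (i - 1)))).drop 1
            ++ [(level.length : Int)])).map (fun se => se.2 - se.1)) (fun y => y)).getD 0 from rfl]
  have hrange : PySem.List.pyRange 0 (level.length : Int) 1
      = List.map (fun k : Nat => (k : Int)) (List.range level.length) := by
    rw [PySem.List.pyRange_one]
    simp only [Int.sub_zero, Int.toNat_natCast, zero_add]
  have hpt : ∀ k ∈ List.range level.length,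
      ((fun i => i == 0 || (PySem.List.pyGet? level i == PySem.List.pyGet? level (i - 1))) ∘
        (fun k : Nat => (k : Int))) k = startB level k := by
    intro k hk
    have hk' : k < level.length := List.mem_range.mp hk
    cases k with
    | zero => rfl
    | succ j =>
      have h1 : (((j + 1 : Nat) : Int) == 0) = false := by
        simp only [beq_eq_false_iff_ne, ne_eq, Int.natCast_eq_zero]
        omega
      have h2 : ((j + 1 : Nat) : Int) - 1 = ((j : Nat) : Int) := by omega
      simp only [Function.comp_apply, h1, Bool.false_or, h2, PySem.List.pyGet?_natCast]
      have hj : j < level.length := by omega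
      rw [List.getElem?_eq_getElem hk', List.getElem?_eq_getElem hj]
      simp only [startB, Nat.add_sub_cancel]
      rw [List.getD_eq_getElem level 0 hk', List.getD_eq_getElem level 0 hj]
      simp
  have hfilter : ((List.range level.length).map (fun k : Nat => (k : Int))).filter (fun i =>
        i == 0 || (PySem.List.pyGet? level i == PySem.List.pyGet? level (i - 1)))
      = ((List.range level.length).filter (startB level)).map (fun k : Nat => (k : Int)) := by
    rw [List.filter_map, List.filter_congr hpt]
  rw [hrange, hfilter, zip_gapsN level.length ((List.range level.length).filter (startB level))]
  have hSne : (List.range level.length).filter (startB level) ≠ [] := by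
    intro hnil
    have h0 : (0 : Nat) ∈ (List.range level.length).filter (startB level) := by
      rw [List.mem_filter]
      exact ⟨List.mem_range.mpr hn, rfl⟩
    rw [hnil] at h0
    exact List.not_mem_nil h0
  exact max?_getD_eq_MX _ (gapsN_ne_nil _ _ hSne)
    (gapsN_nonneg level.length _ ((List.pairwise_lt_range).filter _)
      (fun t ht => List.mem_range.mp (List.mem_of_mem_filter ht)))

-- ===== the crux: max of the DP values = max of the run gaps =====

lemma no_start_run (level : List Int) (s : Nat) (hs : startB level s = true) (e : Nat)
    (hse : s < e) (hno : ∀ t ∈ List.range' (s + 1) (e - s - 1), startB level t = false) :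
    ∀ i, s ≤ i → i < e → dpF level i = (i : Int) - (s : Int) + 1 := by
  intro i hsi hie
  obtain ⟨m, rfl⟩ : ∃ m, i = s + m := ⟨i - s, by omega⟩
  rw [dpF_run level s hs m ?_]
  · push_cast; ring
  · intro t ht1 ht2
    exact hno (s + t) (by rw [List.mem_range'_1]; omega)

lemma main_run (level : List Int) : ∀ (fuel : Nat), ∀ s : Nat, fuel = level.length - s →
    startB level s = true → s < level.length →
    MX ((List.range' s (level.length - s)).map (dpF level))
      = MX (gapsN level.length ((List.range' s (level.length - s)).filter (startB level))) := by
  intro fuel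
  induction fuel using Nat.strong_induction_on with
  | _ fuel ih =>
  intro s hfuel hs hsn
  set n := level.length with hn
  have hfil : (List.range' s (n - s)).filter (startB level)
      = s :: (List.range' (s + 1) (n - s - 1)).filter (startB level) := by
    rw [show n - s = (n - s - 1) + 1 by omega, List.range'_succ, List.filter_cons_of_pos hs]
    norm_num
  rcases hrest : (List.range' (s + 1) (n - s - 1)).filter (startB level) with _ | ⟨e, rest'⟩
  · -- no further starts: a single run [s, n)
    rw [hfil, hrest]
    have hall : ∀ i, s ≤ i → i < s + (n - s) → dpF level i = (i : Int) - (s : Int) + 1 := by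
      intro i h1 h2
      refine no_start_run level s hs n hsn ?_ i h1 (by omega)
      intro t ht
      have := List.filter_eq_nil_iff.mp hrest t ht
      simpa using this
    rw [MX_run (dpF level) s (n - s) hall]
    simp [MX, gapsN]
    omega
  · -- next start e
    have heM : e ∈ (List.range' (s + 1) (n - s - 1)).filter (startB level) := by
      rw [hrest]; exact List.mem_cons_self
    have he1 : e ∈ List.range' (s + 1) (n - s - 1) := List.mem_of_mem_filter heM
    have he2 : startB level e = true := List.of_mem_filter heM
    have hse : s < e ∧ e < n := by
      have := List.mem_range'_1.mp he1
      omega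
    have hsplitIn : List.range' (s + 1) (n - s - 1)
        = List.range' (s + 1) (e - s - 1) ++ List.range' e (n - e) := by
      have h3 := List.range'_append (s := s + 1) (m := e - s - 1) (n := n - e) (step := 1)
      rw [show (s + 1) + 1 * (e - s - 1) = e by omega, show (e - s - 1) + (n - e) = n - s - 1 by omega] at h3
      exact h3.symm
    have hfr : (List.range' e (n - e)).filter (startB level)
        = e :: (List.range' (e + 1) (n - e - 1)).filter (startB level) := by
      rw [show n - e = (n - e - 1) + 1 by omega, List.range'_succ, List.filter_cons_of_pos he2]
      norm_num
    have hfl : (List.range' (s + 1) (e - s - 1)).filter (startB level) = [] := by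
      rcases hflc : (List.range' (s + 1) (e - s - 1)).filter (startB level) with _ | ⟨a, t⟩
      · rfl
      · exfalso
        have hmem : a ∈ List.range' (s + 1) (e - s - 1) :=
          List.mem_of_mem_filter (by rw [hflc]; exact List.mem_cons_self)
        have halt : a < e := by
          have := List.mem_range'_1.mp hmem
          omega
        have h2 : e :: rest' = a :: (t ++ (List.range' e (n - e)).filter (startB level)) := by
          rw [← hrest, hsplitIn, List.filter_append, hflc]
          rfl
        have : e = a := (List.cons_eq_cons.mp h2).1
        omega
    have hrest' : e :: rest' = (List.range' e (n - e)).filter (startB level) := by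
      rw [← hrest, hsplitIn, List.filter_append, hfl, List.nil_append]
    have hIH := ih (n - e) (by omega) e rfl he2 hse.2
    have hsplitL : List.range' s (n - s) = List.range' s (e - s) ++ List.range' e (n - e) := by
      have h3 := List.range'_append (s := s) (m := e - s) (n := n - e) (step := 1)
      rw [show s + 1 * (e - s) = e by omega, show (e - s) + (n - e) = n - s by omega] at h3
      exact h3.symm
    have hleft : MX ((List.range' s (e - s)).map (dpF level)) = ((e - s : Nat) : Int) := by
      apply MX_run
      intro i h1 h2
      refine no_start_run level s hs e hse.1 ?_ i h1 (by omega)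
      intro t ht
      have := List.filter_eq_nil_iff.mp hfl t ht
      simpa using this
    rw [hfil, hrest,
      show gapsN n (s :: e :: rest') = ((e : Int) - (s : Int)) :: gapsN n (e :: rest') from rfl,
      MX_cons _ _ (by omega), hrest', ← hIH,
      hsplitL, List.map_append, MX_append, hleft]
    omega

-- ===== VERDICT (by name: the statement is the Claim_ definition above) =====
theorem roller_coaster_length_spec : Claim_equal_roller_coaster_length := by
  intro level hdom hpre
  unfold Spec_roller_coaster_length
  have hne : level ≠ [] := hpre
  have hn : 0 < level.length := List.length_pos_iff.mpr hne
  rw [A_eq level hne, B_eq level hne]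
  have h0 : startB level 0 = true := rfl
  have := main_run level level.length 0 (by omega) h0 hn
  simpa [List.range_eq_range'] using this
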